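-- pv_equiv track=rewrite | github.com/P3D-Creations/HAAS-HomeAssistant | custom_components/haas_cnc/api.py | _get_mdc_parts
-- ===== SOURCE A (Python) =====
-- def _get_mdc_parts(raw: str) -> list[str]:
--     """Clean and split an MDC response into comma-separated parts.
--
--     Handles multi-line responses by joining all lines.
--     """
--     combined = ""
--     for line in raw.split("\n"):
--         clean = line.lstrip(">").strip()
--         if clean:
--             if combined:
--                 combined += ", "
--             combined += clean
--     return [p.strip() for p in combined.split(",") if p.strip()]
-- ===== SOURCE B (Python) =====
-- def _get_mdc_parts(raw: str) -> list[str]: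
--     """Clean and split an MDC response into comma-separated parts, in one flat pass."""
--     return [
--         s
--         for line in raw.split("\n")
--         for p in line.lstrip(">").strip().split(",")
--         if (s := p.strip())
--     ]
-- ===== Notes on version B (the rewrite author's own statement) =====
-- stated objective: simpler
-- what changed: Drops A's intermediate accumulator string (join nonempty cleaned lines with a comma-space separator, then re-split on commas): B cleans each line and splits its commas directly in one flat comprehension.
import Mathlib
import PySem

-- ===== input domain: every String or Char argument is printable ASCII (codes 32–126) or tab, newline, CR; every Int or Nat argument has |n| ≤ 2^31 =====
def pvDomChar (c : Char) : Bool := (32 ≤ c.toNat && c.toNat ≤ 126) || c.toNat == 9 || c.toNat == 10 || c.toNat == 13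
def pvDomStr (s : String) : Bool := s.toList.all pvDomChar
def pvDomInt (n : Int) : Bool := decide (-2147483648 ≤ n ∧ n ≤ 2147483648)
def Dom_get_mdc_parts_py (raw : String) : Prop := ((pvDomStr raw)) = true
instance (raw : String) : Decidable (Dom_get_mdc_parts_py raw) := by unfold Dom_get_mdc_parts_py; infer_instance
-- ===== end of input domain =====

-- B replaces A's build-joined-string-then-resplit two-phase shape by one flat per-line pass (objective: simpler).


-- ===== PORT A =====
-- line.lstrip(">").strip() — lstrip(">") hand-ported (PySem has no lstrip-with-chars): drop leading '>' chars; exact.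
def pvClean (line : List Char) : List Char :=
  PySem.Chars.strip (line.dropWhile (· == '>'))

-- p.strip() kept iff non-empty (the 'if p.strip()' of both list comprehensions)
def pvKeep (p : List Char) : Option String :=
  if PySem.Chars.strip p ≠ [] then some (String.ofList (PySem.Chars.strip p)) else none

-- the loop body of A: append clean (with ", " separator) when clean is non-empty
def pvStepA (combined line : List Char) : List Char :=
  let clean := pvClean line
  if clean ≠ [] then
    (if combined ≠ [] then combined ++ [',', ' '] else combined) ++ clean
  else combined

def get_mdc_parts_py (raw : String) : List String :=
  let combined := (PySem.Chars.splitOn raw.toList ['\n']).foldl pvStepA []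
  (PySem.Chars.splitOn combined [',']).filterMap pvKeep

-- ===== PORT B =====
def get_mdc_parts_py_alt (raw : String) : List String :=
  (PySem.Chars.splitOn raw.toList ['\n']).flatMap
    (fun line => (PySem.Chars.splitOn (pvClean line) [',']).filterMap pvKeep)

-- ===== PRECONDITION & SPEC =====
def Spec_get_mdc_parts_py (raw : String) (out : List String) : Prop := out = get_mdc_parts_py_alt raw
instance (raw : String) (out : List String) : Decidable (Spec_get_mdc_parts_py raw out) := by unfold Spec_get_mdc_parts_py; infer_instance

-- ===== CLAIM (what is proved, stated in full; the proofs are below) =====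
def Claim_equal_get_mdc_parts_py : Prop := ∀ (raw : String), Dom_get_mdc_parts_py raw → Spec_get_mdc_parts_py raw (get_mdc_parts_py raw)

-- ===== LEMMAS AND PROOFS =====

-- PySem's fuelled single-char splitOn is List.splitOnP
theorem pv_go (c : Char) : ∀ (fuel : Nat) (l cur : List Char) (acc : List (List Char)),
    l.length ≤ fuel →
    PySem.Chars.splitOn.go [c] fuel l cur acc =
      acc.reverse ++ (l.splitOnP (· == c)).modifyHead (cur.reverse ++ ·) := by
  intro fuel
  induction fuel with
  | zero =>
    intro l cur acc h
    have hl : l = [] := List.length_eq_zero_iff.mp (Nat.le_zero.mp h)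
    subst hl
    simp [PySem.Chars.splitOn.go, List.splitOnP_nil]
  | succ f ih =>
    intro l cur acc h
    cases l with
    | nil => simp [PySem.Chars.splitOn.go, List.splitOnP_nil]
    | cons x rest =>
      by_cases hx : x = c
      · subst hx
        have hpre : List.isPrefixOf [x] (x :: rest) = true := by
          simp [List.isPrefixOf]
        rw [show PySem.Chars.splitOn.go [x] (f+1) (x :: rest) cur acc
              = PySem.Chars.splitOn.go [x] f (List.drop 1 (x :: rest)) [] (cur.reverse :: acc) by
            simp [PySem.Chars.splitOn.go, hpre]]
        rw [ih _ _ _ (by simpa using Nat.le_of_succ_le_succ (by simpa using h))]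
        simp [List.splitOnP_cons, show (fun x : List Char => x) = @id (List Char) from rfl]
      · have hpre : List.isPrefixOf [c] (x :: rest) = false := by
          simp [List.isPrefixOf]
          intro hc; exact hx hc.symm
        rw [show PySem.Chars.splitOn.go [c] (f+1) (x :: rest) cur acc
              = PySem.Chars.splitOn.go [c] f rest (x :: cur) acc by
            simp [PySem.Chars.splitOn.go, hpre]]
        rw [ih _ _ _ (by simpa using Nat.le_of_succ_le_succ (by simpa using h))]
        obtain ⟨h1, t1, ht⟩ := List.exists_cons_of_ne_nil (List.splitOnP_ne_nil (· == c) rest)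
        simp [List.splitOnP_cons, hx, ht]

theorem pv_splitOn_single (s : List Char) (c : Char) :
    PySem.Chars.splitOn s [c] = s.splitOnP (· == c) := by
  rw [PySem.Chars.splitOn, pv_go c _ _ _ _ (Nat.le_succ _)]
  simp [show (fun x : List Char => x) = @id (List Char) from rfl]

-- one line's contribution
def pvF (x : List Char) : List String :=
  (x.splitOnP (· == ',')).filterMap pvKeep

theorem pvF_nil : pvF [] = [] := by decide

theorem pvKeep_space (h : List Char) : pvKeep (' ' :: h) = pvKeep h := by
  simp [pvKeep, PySem.Chars.strip, PySem.Chars.lstrip, List.dropWhile, PySem.Chars.isspace]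

theorem pvF_append (a b : List Char) : pvF (a ++ ',' :: ' ' :: b) = pvF a ++ pvF b := by
  unfold pvF
  rw [List.splitOnP_append_cons (· == ',') a (' ' :: b) ',' (by simp), List.filterMap_append]
  congr 1
  obtain ⟨h1, t1, ht⟩ := List.exists_cons_of_ne_nil (List.splitOnP_ne_nil (· == ',') b)
  simp [List.splitOnP_cons, ht, List.filterMap_cons, pvKeep_space]

theorem pvF_join : ∀ (t : List (List Char)) (h : List Char),
    pvF (h ++ t.flatMap ([',', ' '] ++ ·)) = pvF h ++ t.flatMap pvF := by
  intro t
  induction t with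
  | nil => simp
  | cons c t ih =>
    intro h
    have : h ++ ((c :: t).flatMap ([',', ' '] ++ ·)) = h ++ ',' :: ' ' :: (c ++ t.flatMap ([',', ' '] ++ ·)) := by
      simp
    rw [this, pvF_append, ih]
    simp

-- A's loop, from a non-empty accumulator
theorem pv_fold_ne : ∀ (lines : List (List Char)) (acc : List Char), acc ≠ [] →
    lines.foldl pvStepA acc =
      acc ++ ((lines.map pvClean).filter (· ≠ [])).flatMap ([',', ' '] ++ ·) := by
  intro lines
  induction lines with
  | nil => intro acc _; simp
  | cons line rest ih =>
    intro acc hacc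
    by_cases hc : pvClean line = []
    · simp [List.foldl_cons, pvStepA, hc, ih acc hacc]
    · have : pvStepA acc line = acc ++ [',', ' '] ++ pvClean line := by
        simp [pvStepA, hc, hacc]
      simp only [List.foldl_cons, this]
      rw [ih _ (by simp [hacc])]
      simp [hc]

-- A's loop from the empty accumulator
theorem pv_fold_nil : ∀ (lines : List (List Char)),
    lines.foldl pvStepA [] =
      match (lines.map pvClean).filter (· ≠ []) with
      | [] => []
      | h :: t => h ++ t.flatMap ([',', ' '] ++ ·) := by
  intro lines
  induction lines with
  | nil => simp
  | cons line rest ih =>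
    by_cases hc : pvClean line = []
    · simp only [List.foldl_cons, pvStepA, hc]
      simpa [hc] using ih
    · have : pvStepA [] line = pvClean line := by simp [pvStepA, hc]
      simp only [List.foldl_cons, this]
      rw [pv_fold_ne rest (pvClean line) hc]
      simp [hc]

theorem pv_flatMap_filter : ∀ (L : List (List Char)),
    (L.filter (· ≠ [])).flatMap pvF = L.flatMap pvF := by
  intro L
  induction L with
  | nil => rfl
  | cons x L ih =>
    by_cases hx : x = []
    · subst hx; simpa [pvF_nil] using ih
    · have hd : (decide (x ≠ []) : Bool) = true := by simp [hx]
      simp only [List.filter_cons, hd, if_pos, List.flatMap_cons, ih]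

-- ===== VERDICT (by name: the statement is the Claim_ definition above) =====
theorem get_mdc_parts_py_spec : Claim_equal_get_mdc_parts_py := by
  unfold Claim_equal_get_mdc_parts_py
  intro raw _
  unfold Spec_get_mdc_parts_py get_mdc_parts_py get_mdc_parts_py_alt
  simp only [pv_splitOn_single]
  show pvF ((raw.toList.splitOnP (· == '\n')).foldl pvStepA []) = _
  rw [pv_fold_nil]
  have : (raw.toList.splitOnP (· == '\n')).flatMap (fun line => pvF (pvClean line))
      = ((raw.toList.splitOnP (· == '\n')).map pvClean).flatMap pvF := by
    simp [List.flatMap_map]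
  rw [show ((raw.toList.splitOnP (· == '\n')).flatMap fun line => (pvClean line).splitOnP (· == ',') |>.filterMap pvKeep)
      = (raw.toList.splitOnP (· == '\n')).flatMap (fun line => pvF (pvClean line)) from rfl, this,
    ← pv_flatMap_filter]
  cases hm : ((raw.toList.splitOnP (· == '\n')).map pvClean).filter (· ≠ []) with
  | nil => simp [pvF_nil]
  | cons h t => exact pvF_join t h
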